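-- pv_equiv track=rewrite | github.com/Madhav2609/Advanced-GTA-SA-IDE-File-Editor | IDE_editor.py | find_unused_ids
-- ===== SOURCE A (Python) =====
-- def find_unused_ids(used_ids, id_range=90000):
--     all_ids = set(range(id_range + 1))
--     unused_ids = sorted(all_ids - used_ids)
--
--     compressed_ranges = []
--     start = None
--
--     for i in range(len(unused_ids)):
--         if start is None:
--             start = unused_ids[i]
--         if i == len(unused_ids) - 1 or unused_ids[i] + 1 != unused_ids[i + 1]:
--             if start == unused_ids[i]:
--                 compressed_ranges.append(str(start))
--             else:
--                 compressed_ranges.append(f"{start}-{unused_ids[i]}")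
--             start = None
--
--     return ", ".join(compressed_ranges)
-- ===== SOURCE B (Python) =====
-- def find_unused_ids(used_ids, id_range=90000):
--     # Walk the sorted in-range used ids and emit the unused ranges as the gaps
--     # between consecutive used values, instead of materialising all id_range+1 ids.
--     used = sorted({x for x in used_ids if 0 <= x <= id_range})
--     parts = []
--     prev = -1
--     for u in used + [id_range + 1]:
--         lo, hi = prev + 1, u - 1
--         if lo == hi:
--             parts.append(str(lo))
--         elif lo < hi:
--             parts.append(f"{lo}-{hi}")
--         prev = u
--     return ", ".join(parts)
-- ===== Notes on version B (the rewrite author's own statement) =====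
-- stated objective: alternative
-- what changed: Instead of materialising the full set of all id_range+1 ids, subtracting the used ids and sorting that huge complement before compressing it with an index loop, B sorts only the deduplicated in-range used ids and emits the unused ranges directly as the gaps between consecutive used values plus the two boundaries; intended as faster for sparse used ids, but a timing run measured only ~1.3x, so no speed is claimed.
import Mathlib
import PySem

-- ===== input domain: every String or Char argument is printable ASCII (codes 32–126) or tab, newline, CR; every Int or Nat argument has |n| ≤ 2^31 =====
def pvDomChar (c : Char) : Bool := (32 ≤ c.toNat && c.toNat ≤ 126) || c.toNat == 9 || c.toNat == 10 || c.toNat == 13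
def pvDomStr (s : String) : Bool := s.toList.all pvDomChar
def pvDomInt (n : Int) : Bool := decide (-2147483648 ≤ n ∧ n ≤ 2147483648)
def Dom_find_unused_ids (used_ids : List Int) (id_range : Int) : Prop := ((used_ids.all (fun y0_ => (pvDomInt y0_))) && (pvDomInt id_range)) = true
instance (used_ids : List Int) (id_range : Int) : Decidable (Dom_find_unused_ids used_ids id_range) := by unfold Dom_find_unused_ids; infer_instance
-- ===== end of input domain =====

-- B replaces A's "materialise all id_range+1 ids, subtract the used ones, sort the
-- complement, compress it with an index loop" by sorting only the in-range used ids and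
-- emitting each unused range directly as the gap between consecutive used values
-- (intended as faster for sparse used ids; a timing run measured ~1.3x, below its
-- 1.5x bar, so no speed is claimed).

-- ===== PORT A =====
-- A's loop 'for i in range(len(unused_ids))' as the obvious structural recursion over
-- the same state (compressed, start), reading unused[i] as the head of the remaining
-- suffix and unused[i+1] as the head of its tail; 'i == len-1' is 'the tail is empty'
-- (the unused[i+1] access is short-circuited away there, exactly as in Python).
def findLoopA (unused : List Int) (compressed : List String) (start : Option Int) : List String :=
  match unused with
  | [] => compressed
  | x :: rest =>
    let start' := match start with
      | none => x                      -- if start is None: start = unused_ids[i]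
      | some s => s
    if rest.isEmpty || !(x + 1 == rest.headD 0) then
      findLoopA rest
        (compressed ++ [if start' == x then PySem.Int.toStr start'
                        else PySem.Int.toStr start' ++ "-" ++ PySem.Int.toStr x])
        none
    else
      findLoopA rest compressed (some start')

def find_unused_ids (used_ids : List Int) (id_range : Int) : String :=
  -- set(range(id_range+1)): range(id_range+1) is duplicate-free, so under the PySem.Set
  -- convention (distinct elements in first-insertion order) this set IS that list.
  let all_ids : PySem.Set Int := PySem.List.pyRange 0 (id_range + 1)
  -- sorted(...): ported as the O(n log n) stable merge sort (what CPython's sorted is);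
  -- PySem.List.sorted computes the same list but, being an insertion sort, cannot be
  -- evaluated at id_range ≈ 9·10^4.
  let unused_ids := (PySem.Set.diff all_ids used_ids).mergeSort (fun a b => decide (a ≤ b))
  PySem.Str.join ", " (findLoopA unused_ids [] none)

-- ===== PORT B =====
def find_unused_ids_alt (used_ids : List Int) (id_range : Int) : String :=
  let used := PySem.List.sorted
    (PySem.Set.ofList (used_ids.filter (fun x => decide (0 ≤ x) && decide (x ≤ id_range))))
    (fun x => x)
  let r := (used ++ [id_range + 1]).foldl
    (fun (st : List String × Int) u =>
      let lo := st.2 + 1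
      let hi := u - 1
      (if lo == hi then st.1 ++ [PySem.Int.toStr lo]
       else if lo < hi then st.1 ++ [PySem.Int.toStr lo ++ "-" ++ PySem.Int.toStr hi]
       else st.1, u))
    ([], -1)
  PySem.Str.join ", " r.1

-- ===== PRECONDITION & SPEC =====
def Spec_find_unused_ids (used_ids : List Int) (id_range : Int) (out : String) : Prop := out = find_unused_ids_alt used_ids id_range
instance (used_ids : List Int) (id_range : Int) (out : String) : Decidable (Spec_find_unused_ids used_ids id_range out) := by unfold Spec_find_unused_ids; infer_instance

-- ===== CLAIM (what is proved, stated in full; the proofs are below) =====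
def Claim_equal_find_unused_ids : Prop := ∀ (used_ids : List Int) (id_range : Int), Dom_find_unused_ids used_ids id_range → Spec_find_unused_ids used_ids id_range (find_unused_ids used_ids id_range)

-- ===== LEMMAS AND PROOFS =====

-- [a, a+1, ..., a+n-1]
def seg : Int → Nat → List Int
  | _, 0 => []
  | a, n+1 => a :: seg (a+1) n

def fmtR (s x : Int) : String :=
  if s = x then PySem.Int.toStr s else PySem.Int.toStr s ++ "-" ++ PySem.Int.toStr x

-- A's compression loop, structurally over the suffix of the unused list
def partsFrom : Option Int → List Int → List String
  | _, [] => []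
  | st, [x] => [fmtR (st.getD x) x]
  | st, x :: y :: t =>
    if x + 1 = y then partsFrom (some (st.getD x)) (y :: t)
    else fmtR (st.getD x) x :: partsFrom none (y :: t)

def gap (lo hi : Int) : List String := if hi < lo then [] else [fmtR lo hi]

-- B's gap emission, structurally over the used list
def gaps : Int → List Int → List String
  | _, [] => []
  | prev, u :: t => gap (prev + 1) (u - 1) ++ gaps u t

theorem contains_true {l : List Int} {x : Int} (h : x ∈ l) : l.contains x = true :=
  List.contains_iff_mem.mpr h

theorem contains_false {l : List Int} {x : Int} (h : x ∉ l) : l.contains x = false := by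
  rw [← Bool.not_eq_true, List.contains_iff_mem]; exact h

theorem mem_seg (x : Int) : ∀ (n : Nat) (a : Int), x ∈ seg a n ↔ a ≤ x ∧ x < a + n := by
  intro n
  induction n with
  | zero => intro a; simp [seg]
  | succ m ih => intro a; simp [seg, ih (a+1)]; omega

theorem pairwise_seg : ∀ (n : Nat) (a : Int), (seg a n).Pairwise (· < ·) := by
  intro n
  induction n with
  | zero => intro a; simp [seg]
  | succ m ih =>
    intro a
    refine List.pairwise_cons.mpr ⟨?_, ih (a+1)⟩
    intro y hy
    have := (mem_seg y m (a+1)).mp hy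
    omega

theorem nodup_seg (n : Nat) (a : Int) : (seg a n).Nodup :=
  (pairwise_seg n a).imp (fun h => by omega)

theorem seg_append (p : Nat) : ∀ (q : Nat) (a : Int), seg a (p + q) = seg a p ++ seg (a + p) q := by
  induction p with
  | zero => intro q a; simp [seg]
  | succ k ih =>
    intro q a
    have h1 : k + 1 + q = (k + q) + 1 := by omega
    rw [h1]
    show a :: seg (a+1) (k + q) = (a :: seg (a+1) k) ++ seg (a + ((k+1 : Nat) : Int)) q
    have hc : a + 1 + (k : Int) = a + ((k+1 : Nat) : Int) := by push_cast; ring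
    rw [ih q (a+1), hc, List.cons_append]

theorem pyRange_eq_seg : ∀ (n : Nat) (a b : Int), (b - a).toNat = n →
    PySem.List.pyRange a b = seg a n := by
  intro n
  induction n with
  | zero =>
    intro a b h
    have hba : ¬ a < b := by omega
    simp [PySem.List.pyRange, hba, seg]
  | succ m ih =>
    intro a b h
    have hab : a < b := by omega
    rw [PySem.List.pyRange_one_cons hab]
    show _ = a :: seg (a+1) m
    rw [ih (a+1) b (by omega)]

theorem run_append : ∀ (m : Nat) (a : Int) (s : Option Int) (M : List Int),
    (∀ y ∈ M.head?, y ≠ a + m + 1) →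
    partsFrom s (seg a (m+1) ++ M) = fmtR (s.getD a) (a + m) :: partsFrom none M := by
  intro m
  induction m with
  | zero =>
    intro a s M hM
    match M with
    | [] => simp [seg, partsFrom]
    | y :: t =>
      have hy : y ≠ a + 1 := by have := hM y (by simp); omega
      simp only [seg, List.cons_append, List.nil_append, partsFrom]
      rw [if_neg (by omega)]
      simp
  | succ k ih =>
    intro a s M hM
    show partsFrom s (a :: (seg (a+1) (k+1) ++ M)) = _
    have hseg : seg (a+1) (k+1) ++ M = (a+1) :: (seg (a+1+1) k ++ M) := by simp [seg]
    rw [hseg]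
    show (if a + 1 = a + 1 then partsFrom (some (Option.getD s a)) ((a+1) :: (seg (a+1+1) k ++ M))
          else fmtR (Option.getD s a) a :: partsFrom none ((a+1) :: (seg (a+1+1) k ++ M))) = _
    rw [if_pos rfl, ← hseg, ih (a+1) (some (Option.getD s a)) M (by intro y hy; have := hM y hy; omega)]
    have h2 : a + 1 + (k : Int) = a + ((k : Int) + 1) := by ring
    push_cast
    rw [h2]
    simp

-- the crux: compressing the unused complement of a strictly increasing used list
-- equals emitting the gaps between consecutive used values
theorem crux : ∀ (us : List Int), us.Pairwise (· < ·) →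
    ∀ (n : Nat) (a : Int), (∀ u ∈ us, a ≤ u ∧ u < a + n) →
    partsFrom none ((seg a n).filter (fun x => !us.contains x)) = gaps (a - 1) (us ++ [a + n]) := by
  intro us
  induction us with
  | nil =>
    intro _ n a _
    rw [show (List.filter (fun x => !List.contains ([] : List Int) x) (seg a n)) = seg a n from
      List.filter_eq_self.mpr (fun x _ => rfl)]
    match n with
    | 0 =>
      show ([] : List String) = gaps (a - 1) ([] ++ [a + ((0:Nat) : Int)])
      simp only [List.nil_append, gaps, gap, List.append_nil]
      rw [if_pos (by push_cast; omega)]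
    | m+1 =>
      have hr := run_append m a none [] (by simp)
      rw [List.append_nil] at hr
      rw [hr]
      simp only [List.nil_append, gaps, gap, List.append_nil, Option.getD_none, partsFrom]
      rw [if_neg (by push_cast; omega)]
      have e1 : a - 1 + 1 = a := by ring
      have e2 : a + ((m+1 : Nat) : Int) - 1 = a + (m : Int) := by push_cast; ring
      rw [e1, e2]
  | cons u rest ih =>
    intro hpw n a hb
    have hrest : ∀ v ∈ rest, u < v := fun v hv => (List.pairwise_cons.mp hpw).1 v hv
    have hpwr : rest.Pairwise (· < ·) := (List.pairwise_cons.mp hpw).2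
    obtain ⟨hau, hun⟩ := hb u (by simp)
    set p : Nat := (u - a).toNat with hp
    have hap : a + (p : Int) = u := by omega
    have hpn : p < n := by omega
    set m : Nat := n - p - 1 with hm
    have hn : n = p + (m + 1) := by omega
    have hanm : a + (n : Int) = u + 1 + m := by omega
    -- split the segment at u
    have hsplit : seg a n = seg a p ++ (u :: seg (u+1) m) := by
      rw [hn, seg_append p (m+1) a, hap]
      rfl
    -- compute the filter on each piece
    have hf1 : (seg a p).filter (fun x => !List.contains (u :: rest) x) = seg a p := by
      apply List.filter_eq_self.mpr
      intro x hx
      have hxlt : x < u := by have := (mem_seg x p a).mp hx; omega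
      have hnm : x ∉ u :: rest := by
        intro hc
        rcases List.mem_cons.mp hc with h | h
        · omega
        · exact absurd (hrest x h) (by omega)
      rw [contains_false hnm]
      rfl
    have hf3 : (seg (u+1) m).filter (fun x => !List.contains (u :: rest) x)
             = (seg (u+1) m).filter (fun x => !rest.contains x) := by
      apply List.filter_congr
      intro x hx
      have hxgt : u < x := by have := (mem_seg x m (u+1)).mp hx; omega
      by_cases hmem : x ∈ rest
      · rw [contains_true hmem, contains_true (List.mem_cons_of_mem u hmem)]
      · have : x ∉ u :: rest := by
          intro hc
          rcases List.mem_cons.mp hc with h | h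
          · omega
          · exact hmem h
        rw [contains_false hmem, contains_false this]
    set T := (seg (u+1) m).filter (fun x => !rest.contains x) with hT
    have hfilter : (seg a n).filter (fun x => !List.contains (u :: rest) x) = seg a p ++ T := by
      rw [hsplit, List.filter_append]
      rw [hf1]
      show _ ++ List.filter _ (u :: seg (u+1) m) = _
      rw [List.filter_cons_of_neg (by simp), hf3]
    have hT_head : ∀ y ∈ T.head?, u + 1 ≤ y := by
      intro y hy
      have h1 : y ∈ T := List.mem_of_mem_head? hy
      have h2 : y ∈ seg (u+1) m := List.mem_of_mem_filter h1
      have := (mem_seg y m (u+1)).mp h2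
      omega
    have hih : partsFrom none T = gaps u (rest ++ [u + 1 + m]) := by
      have h := ih hpwr m (u+1) (fun v hv => by
        have h1 := hrest v hv
        have h2 := (hb v (by simp [hv])).2
        refine ⟨by omega, by omega⟩)
      have e : u + 1 - 1 = u := by ring
      rw [e] at h
      exact h
    have hrhs : gaps (a - 1) ((u :: rest) ++ [a + n]) = gap a (u - 1) ++ gaps u (rest ++ [u + 1 + m]) := by
      show gap (a - 1 + 1) (u - 1) ++ gaps u (rest ++ [a + n]) = _
      rw [hanm]
      have e : a - 1 + 1 = a := by ring
      rw [e]
    rw [hfilter, hrhs, ← hih]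
    rcases Nat.eq_zero_or_pos p with hp0 | hppos
    · have hau' : a = u := by omega
      rw [hp0]
      show partsFrom none T = gap a (u - 1) ++ partsFrom none T
      have : gap a (u - 1) = [] := by rw [gap, if_pos (by omega)]
      rw [this, List.nil_append]
    · obtain ⟨k, hk⟩ : ∃ k, p = k + 1 := ⟨p - 1, by omega⟩
      rw [hk]
      rw [run_append k a none T (by
        intro y hy
        have := hT_head y hy
        have hak : a + ((k : Int) + 1) = u := by rw [hk] at hap; push_cast at hap; omega
        omega)]
      have hak : a + (k : Int) = u - 1 := by rw [hk] at hap; push_cast at hap; omega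
      rw [hak]
      have : gap a (u - 1) = [fmtR a (u - 1)] := by rw [gap, if_neg (by omega)]
      rw [this]
      rfl

-- A's loop computes partsFrom
theorem findLoopA_eq : ∀ (l : List Int) (c : List String) (st : Option Int),
    findLoopA l c st = c ++ partsFrom st l := by
  intro l
  induction l with
  | nil => intro c st; simp [findLoopA, partsFrom]
  | cons x rest ih =>
    intro c st
    rw [findLoopA.eq_def]
    simp only []
    generalize hSt : (match st with | none => x | some s => s) = start'
    have hst : start' = st.getD x := by
      cases st with
      | none => exact hSt.symm
      | some s => exact hSt.symm
    have hemit : (if (start' == x) = true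
          then PySem.Int.toStr start'
          else PySem.Int.toStr start' ++ "-" ++ PySem.Int.toStr x)
        = fmtR (st.getD x) x := by
      rw [hst, fmtR]
      by_cases he : st.getD x = x <;> simp [he]
    match rest with
    | [] =>
      rw [if_pos (by simp), ih, hemit]
      simp [partsFrom]
    | y :: t =>
      by_cases hxy : x + 1 = y
      · rw [if_neg (by simp [hxy]), ih, hst, partsFrom, if_pos hxy]
      · rw [if_pos (by simp [hxy]), ih, hemit, partsFrom, if_neg hxy]
        simp

-- B's fold computes the gaps
theorem foldB_eq : ∀ (l : List Int) (acc : List String) (prev : Int),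
    (l.foldl
      (fun (st : List String × Int) u =>
        let lo := st.2 + 1
        let hi := u - 1
        (if lo == hi then st.1 ++ [PySem.Int.toStr lo]
         else if lo < hi then st.1 ++ [PySem.Int.toStr lo ++ "-" ++ PySem.Int.toStr hi]
         else st.1, u))
      (acc, prev)).1 = acc ++ gaps prev l := by
  intro l
  induction l with
  | nil => intro acc prev; simp [gaps]
  | cons u t ih =>
    intro acc prev
    rw [List.foldl_cons]
    show (t.foldl _ ((if (prev + 1) == (u - 1) then acc ++ [PySem.Int.toStr (prev+1)]
         else if prev + 1 < u - 1 then acc ++ [PySem.Int.toStr (prev+1) ++ "-" ++ PySem.Int.toStr (u-1)]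
         else acc), u)).1 = acc ++ gaps prev (u :: t)
    rw [ih]
    show _ = acc ++ (gap (prev+1) (u-1) ++ gaps u t)
    rw [gap, fmtR]
    by_cases h1 : prev + 1 = u - 1
    · rw [if_pos (by simpa using h1), if_neg (by omega), if_pos h1]
      simp
    · rw [if_neg (by simpa using h1)]
      by_cases h2 : prev + 1 < u - 1
      · rw [if_pos h2, if_neg (by omega), if_neg h1]
        simp
      · rw [if_neg h2, if_pos (by omega)]
        simp

-- A's sorted unused list is the increasing filter of the segment
theorem unusedA_eq (used_ids : List Int) (id_range : Int) :
    (PySem.Set.diff (PySem.List.pyRange 0 (id_range + 1) : PySem.Set Int) used_ids).mergeSort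
      (fun a b => decide (a ≤ b))
    = (seg 0 (id_range + 1).toNat).filter (fun x => !used_ids.contains x) := by
  have hR : PySem.List.pyRange 0 (id_range + 1) = seg 0 (id_range + 1).toNat :=
    pyRange_eq_seg _ 0 (id_range + 1) (by omega)
  show (List.filter _ (PySem.List.pyRange 0 (id_range + 1))).mergeSort _ = _
  rw [hR]
  exact List.mergeSort_of_pairwise
    (((pairwise_seg _ _).filter _).imp (fun h => by simpa using le_of_lt h))

-- B's sorted used list is the increasing filter of the segment
theorem usedB_eq (used_ids : List Int) (id_range : Int) :
    PySem.List.sorted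
      (PySem.Set.ofList (used_ids.filter (fun x => decide (0 ≤ x) && decide (x ≤ id_range))))
      (fun x => x)
    = (seg 0 (id_range + 1).toNat).filter (fun x => used_ids.contains x) := by
  apply PySem.List.sorted_eq_of_perm_of_pairwise_lt
  · apply (List.perm_ext_iff_of_nodup ((nodup_seg _ _).filter _) (PySem.Set.nodup_ofList _)).mpr
    intro x
    rw [PySem.Set.mem_ofList, List.mem_filter, List.mem_filter, mem_seg]
    simp only [List.contains_iff_mem, Bool.and_eq_true, decide_eq_true_eq]
    constructor
    · rintro ⟨⟨h0, hlt⟩, hm⟩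
      exact ⟨hm, h0, by omega⟩
    · rintro ⟨hm, h0, hle⟩
      exact ⟨⟨h0, by omega⟩, hm⟩
  · exact (pairwise_seg _ _).filter _

-- the two filter predicates agree on the segment
theorem filter_pred_eq (used_ids : List Int) (n : Nat) :
    (seg 0 n).filter (fun x => !used_ids.contains x)
    = (seg 0 n).filter (fun x => !((seg 0 n).filter (fun y => used_ids.contains y)).contains x) := by
  apply List.filter_congr
  intro x hx
  by_cases hmem : x ∈ used_ids
  · have h1 : x ∈ (seg 0 n).filter (fun y => used_ids.contains y) :=
      List.mem_filter.mpr ⟨hx, contains_true hmem⟩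
    rw [contains_true hmem, contains_true h1]
  · have h1 : x ∉ (seg 0 n).filter (fun y => used_ids.contains y) := by
      intro hc
      have := (List.mem_filter.mp hc).2
      rw [contains_false hmem] at this
      exact Bool.false_ne_true this
    rw [contains_false hmem, contains_false h1]

-- ===== VERDICT (by name: the statement is the Claim_ definition above) =====
theorem find_unused_ids_spec : Claim_equal_find_unused_ids := by
  intro used_ids id_range _
  unfold Spec_find_unused_ids find_unused_ids find_unused_ids_alt
  simp only []
  rw [unusedA_eq used_ids id_range, usedB_eq used_ids id_range, foldB_eq, findLoopA_eq, List.nil_append, List.nil_append]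
  congr 1
  rw [filter_pred_eq used_ids (id_range + 1).toNat]
  by_cases hN : -1 ≤ id_range
  · have h := crux ((seg 0 (id_range + 1).toNat).filter (fun y => used_ids.contains y))
      ((pairwise_seg _ _).filter _) (id_range + 1).toNat 0 (by
        intro u hu
        have := (mem_seg u (id_range + 1).toNat 0).mp (List.mem_of_mem_filter hu)
        omega)
    have h1 : (0 : Int) + ((id_range + 1).toNat : Int) = id_range + 1 := by omega
    have h2 : (0 : Int) - 1 = -1 := by ring
    rw [h1, h2] at h
    exact h
  · have hn0 : (id_range + 1).toNat = 0 := by omega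
    rw [hn0]
    show partsFrom none (List.filter _ []) = gaps (-1) (List.filter _ [] ++ [id_range + 1])
    rw [List.filter_nil, List.filter_nil]
    have e1 : (-1 : Int) + 1 = 0 := by ring
    have e2 : id_range + 1 - 1 = id_range := by ring
    simp only [partsFrom, gaps, List.nil_append, List.append_nil, e1, e2]
    rw [gap, if_pos (by omega)]
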